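-- pv_equiv track=rewrite | github.com/marcelowf/Analysis-of-Lotofacil-subsets | Data_Analysis/SB15_11.py | find_subsets_of_15_that_contain_11
-- ===== SOURCE A (Python) =====
-- def find_subsets_of_15_that_contain_11(combinations_15, combinations_11):
--     subset = []
--     set_11 = set(map(tuple, combinations_11))
--
--     for comb15 in combinations_15:
--         comb15_set = set(comb15)
--         matching_subsets = {subset_11 for subset_11 in set_11 if set(subset_11).issubset(comb15_set)}
--         if matching_subsets:
--             subset.append(comb15)
--             set_11 -= matching_subsets
--         if not set_11:
--             break
--
--     return subset
-- ===== SOURCE B (Python) =====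
-- def find_subsets_of_15_that_contain_11(combinations_15, combinations_11):
--     selected = set()
--     for comb11 in set(map(tuple, combinations_11)):
--         for i, comb15 in enumerate(combinations_15):
--             if set(comb11).issubset(set(comb15)):
--                 selected.add(i)
--                 break
--     return [comb15 for i, comb15 in enumerate(combinations_15) if i in selected]
-- ===== Notes on version B (the rewrite author's own statement) =====
-- stated objective: alternative
-- what changed: Flips the loop nesting: instead of scanning the 15-combos while shrinking a set of uncovered 11-combos, B maps each distinct 11-combo to the index of the first 15-combo covering it and emits, in input order, the 15-combos whose index was selected.
import Mathlib
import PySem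

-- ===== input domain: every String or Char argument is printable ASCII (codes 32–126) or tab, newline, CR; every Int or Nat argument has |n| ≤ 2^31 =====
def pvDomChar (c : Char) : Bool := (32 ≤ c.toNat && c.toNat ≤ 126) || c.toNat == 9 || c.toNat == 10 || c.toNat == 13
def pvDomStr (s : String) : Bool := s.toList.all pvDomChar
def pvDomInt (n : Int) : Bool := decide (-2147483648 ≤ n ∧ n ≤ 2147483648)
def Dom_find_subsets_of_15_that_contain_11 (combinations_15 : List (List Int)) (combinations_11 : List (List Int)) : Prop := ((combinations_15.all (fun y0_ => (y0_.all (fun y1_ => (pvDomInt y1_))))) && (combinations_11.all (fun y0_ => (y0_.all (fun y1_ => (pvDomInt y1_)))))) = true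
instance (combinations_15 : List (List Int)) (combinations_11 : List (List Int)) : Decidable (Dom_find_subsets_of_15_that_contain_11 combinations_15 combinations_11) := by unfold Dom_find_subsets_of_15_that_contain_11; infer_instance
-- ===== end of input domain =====

-- B replaces A's outer scan over 15-combos with a shrinking uncovered-set by a per-11-combo
-- earliest-covering-index search plus a selected-index set; same output (alternative decomposition).

-- ===== PORT A =====
-- the for-loop over combinations_15 with its break, carrying (subset, set_11)
def fsALoop (l : List (List Int)) (set11 : PySem.Set (List Int)) (subset : List (List Int)) :
    List (List Int) :=
  match l with
  | [] => subset
  | comb15 :: rest =>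
    let comb15_set : PySem.Set Int := PySem.Set.ofList comb15
    let matching : PySem.Set (List Int) :=
      PySem.Set.ofList (set11.filter
        (fun s => PySem.Set.issubset (PySem.Set.ofList s) comb15_set))
    let subset' := if matching = [] then subset else subset ++ [comb15]
    let set11' := if matching = [] then set11 else PySem.Set.diff set11 matching
    if set11' = [] then subset' else fsALoop rest set11' subset'

def find_subsets_of_15_that_contain_11 (combinations_15 : List (List Int)) (combinations_11 : List (List Int)) : List (List Int) :=
  fsALoop combinations_15 (PySem.Set.ofList combinations_11) []

-- ===== PORT B =====
-- inner loop: 'for i, comb15 in enumerate(combinations_15): if ... : selected.add(i); break'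
def fsBFind (l : List (List Int)) (i : Nat) (comb11 : List Int) (selected : PySem.Set Nat) :
    PySem.Set Nat :=
  match l with
  | [] => selected
  | comb15 :: rest =>
    if PySem.Set.issubset (PySem.Set.ofList comb11) (PySem.Set.ofList comb15) then
      PySem.Set.add selected i
    else fsBFind rest (i + 1) comb11 selected

-- final comprehension: '[comb15 for i, comb15 in enumerate(combinations_15) if i in selected]'
def fsBOut (l : List (List Int)) (i : Nat) (selected : PySem.Set Nat) : List (List Int) :=
  match l with
  | [] => []
  | comb15 :: rest =>
    if PySem.Set.contains selected i then comb15 :: fsBOut rest (i + 1) selected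
    else fsBOut rest (i + 1) selected

def find_subsets_of_15_that_contain_11_alt (combinations_15 : List (List Int)) (combinations_11 : List (List Int)) : List (List Int) :=
  let selected : PySem.Set Nat :=
    (PySem.Set.ofList combinations_11).foldl
      (fun sel comb11 => fsBFind combinations_15 0 comb11 sel) PySem.Set.empty
  fsBOut combinations_15 0 selected

-- ===== PRECONDITION & SPEC =====
def Spec_find_subsets_of_15_that_contain_11 (combinations_15 : List (List Int)) (combinations_11 : List (List Int)) (out : List (List Int)) : Prop := out = find_subsets_of_15_that_contain_11_alt combinations_15 combinations_11
instance (combinations_15 : List (List Int)) (combinations_11 : List (List Int)) (out : List (List Int)) : Decidable (Spec_find_subsets_of_15_that_contain_11 combinations_15 combinations_11 out) := by unfold Spec_find_subsets_of_15_that_contain_11; infer_instance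

-- ===== CLAIM (what is proved, stated in full; the proofs are below) =====
def Claim_equal_find_subsets_of_15_that_contain_11 : Prop := ∀ (combinations_15 : List (List Int)) (combinations_11 : List (List Int)), Dom_find_subsets_of_15_that_contain_11 combinations_15 combinations_11 → Spec_find_subsets_of_15_that_contain_11 combinations_15 combinations_11 (find_subsets_of_15_that_contain_11 combinations_15 combinations_11)

-- ===== LEMMAS AND PROOFS =====

-- proof-side helpers: 'fsCov c15 c11' = "c11 ⊆ c15 as sets"; 'fsG' = the common greedy recursion
def fsCov (c15 c11 : List Int) : Bool := c11.all (fun x => decide (x ∈ c15))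

def fsG (l : List (List Int)) (C : List (List Int)) : List (List Int) :=
  match l with
  | [] => []
  | c :: rest =>
    (if C.any (fsCov c) then [c] else []) ++ fsG rest (C.filter (fun s => !fsCov c s))

-- proof-side mirror of fsBFind: index of the first covering 15-combo
def fsFirst (l : List (List Int)) (k : Nat) (c11 : List Int) : Option Nat :=
  match l with
  | [] => none
  | c :: rest => if fsCov c c11 then some k else fsFirst rest (k + 1) c11

-- predicate version of fsBOut
def fsOutP (l : List (List Int)) (k : Nat) (P : Nat → Bool) : List (List Int) :=
  match l with
  | [] => []
  | c :: rest => if P k then c :: fsOutP rest (k + 1) P else fsOutP rest (k + 1) P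

theorem fsCov_eq_issubset (c s : List Int) :
    PySem.Set.issubset (PySem.Set.ofList s) (PySem.Set.ofList c) = fsCov c s := by
  apply Bool.eq_iff_iff.mpr
  simp [PySem.Set.issubset_iff, PySem.Set.mem_ofList, fsCov, List.all_eq_true]

theorem fsG_nil (l : List (List Int)) : fsG l [] = [] := by
  induction l with
  | nil => rfl
  | cons c rest ih => simp [fsG, ih]

theorem fsG_congr (l : List (List Int)) :
    ∀ C C' : List (List Int), (∀ x, x ∈ C ↔ x ∈ C') → fsG l C = fsG l C' := by
  induction l with
  | nil => intro C C' _; rfl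
  | cons c rest ih =>
    intro C C' h
    have hany : C.any (fsCov c) = C'.any (fsCov c) := by
      apply Bool.eq_iff_iff.mpr
      simp only [List.any_eq_true]
      constructor
      · rintro ⟨x, hx, hc⟩; exact ⟨x, (h x).1 hx, hc⟩
      · rintro ⟨x, hx, hc⟩; exact ⟨x, (h x).2 hx, hc⟩
    have hfil : ∀ x, x ∈ C.filter (fun s => !fsCov c s) ↔ x ∈ C'.filter (fun s => !fsCov c s) := by
      intro x; simp only [List.mem_filter]; rw [h x]
    rw [fsG, fsG, hany, ih _ _ hfil]

-- A's loop computes fsG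
theorem fsALoop_eq_fsG (l : List (List Int)) :
    ∀ (S : PySem.Set (List Int)) (acc : List (List Int)), S.Nodup →
      fsALoop l S acc = acc ++ fsG l S := by
  induction l with
  | nil => intro S acc _; simp [fsALoop, fsG]
  | cons c rest ih =>
    intro S acc hnd
    have hpred : (fun s => PySem.Set.issubset (PySem.Set.ofList s) (PySem.Set.ofList c))
        = fun s => fsCov c s := by
      funext s; exact fsCov_eq_issubset c s
    have hmatch : PySem.Set.ofList (S.filter
        (fun s => PySem.Set.issubset (PySem.Set.ofList s) (PySem.Set.ofList c)))
        = S.filter (fsCov c) := by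
      rw [hpred]
      exact PySem.Set.ofList_eq_self_of_nodup _ (hnd.filter _)
    rw [fsALoop]
    simp only [hmatch]
    by_cases hm : S.filter (fsCov c) = []
    · -- no matching subsets: accumulator and set unchanged
      have hanyf : S.any (fsCov c) = false := by
        rcases h : S.any (fsCov c) with _ | _
        · rfl
        · exfalso
          rcases List.any_eq_true.mp h with ⟨x, hx, hc⟩
          have : x ∈ S.filter (fsCov c) := List.mem_filter.mpr ⟨hx, hc⟩
          rw [hm] at this; exact absurd this (List.not_mem_nil)
      have hfilS : S.filter (fun s => !fsCov c s) = S := by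
        apply List.filter_eq_self.mpr
        intro x hx
        rcases h : fsCov c x with _ | _
        · rfl
        · exfalso
          have : x ∈ S.filter (fsCov c) := List.mem_filter.mpr ⟨hx, h⟩
          rw [hm] at this; exact absurd this (List.not_mem_nil)
      simp only [if_pos hm]
      by_cases hS : (S : List (List Int)) = []
      · subst hS
        simp [fsG, fsG_nil]
      · rw [if_neg hS, ih S acc hnd, fsG, hanyf, hfilS]
        simp
    · -- some matching subsets: append c, remove them
      have hany : S.any (fsCov c) = true := by
        rcases List.ne_nil_iff_exists_cons.mp hm with ⟨x, xs, hx⟩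
        have hxmem : x ∈ S.filter (fsCov c) := by rw [hx]; exact List.mem_cons_self
        rcases List.mem_filter.mp hxmem with ⟨hxS, hxc⟩
        exact List.any_eq_true.mpr ⟨x, hxS, hxc⟩
      have hdiffmem : ∀ x, x ∈ PySem.Set.diff S (S.filter (fsCov c)) ↔
          x ∈ S.filter (fun s => !fsCov c s) := by
        intro x
        rw [PySem.Set.mem_diff]
        simp only [List.mem_filter, Bool.not_eq_true', not_and, Bool.not_eq_true]
        constructor
        · rintro ⟨hxS, hxn⟩
          exact ⟨hxS, hxn hxS⟩
        · rintro ⟨hxS, hxn⟩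
          exact ⟨hxS, fun _ => hxn⟩
      simp only [if_neg hm]
      by_cases hD : PySem.Set.diff S (S.filter (fsCov c)) = []
      · -- break: everything covered now
        rw [if_pos hD]
        have hfnil : S.filter (fun s => !fsCov c s) = [] := by
          apply List.eq_nil_iff_forall_not_mem.mpr
          intro x hx
          have := (hdiffmem x).mpr hx
          rw [hD] at this; exact absurd this (List.not_mem_nil)
        rw [fsG, hany, hfnil, fsG_nil]
        simp
      · rw [if_neg hD]
        have hndD : (PySem.Set.diff S (S.filter (fsCov c))).Nodup :=
          PySem.Set.nodup_diff _ _ hnd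
        rw [ih _ _ hndD, fsG, hany,
          fsG_congr rest _ _ hdiffmem]
        simp

-- B-side lemmas
theorem fsBFind_eq_fsFirst (l : List (List Int)) :
    ∀ (k : Nat) (c11 : List Int) (sel : PySem.Set Nat),
      fsBFind l k c11 sel = match fsFirst l k c11 with
        | some i => PySem.Set.add sel i
        | none => sel := by
  induction l with
  | nil => intro k c11 sel; rfl
  | cons c rest ih =>
    intro k c11 sel
    rw [fsBFind, fsFirst, fsCov_eq_issubset]
    rcases h : fsCov c c11 with _ | _
    · simp only [Bool.false_eq_true, if_false]
      exact ih (k + 1) c11 sel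
    · simp

theorem mem_fsBFind (l : List (List Int)) (k : Nat) (c11 : List Int) (sel : PySem.Set Nat)
    (i : Nat) : i ∈ fsBFind l k c11 sel ↔ i ∈ sel ∨ fsFirst l k c11 = some i := by
  rw [fsBFind_eq_fsFirst]
  rcases h : fsFirst l k c11 with _ | j
  · simp
  · simp [PySem.Set.mem_add, eq_comm]

theorem mem_selected (cs : List (List Int)) (L : List (List Int)) :
    ∀ (sel : PySem.Set Nat) (i : Nat),
      i ∈ cs.foldl (fun sel comb11 => fsBFind L 0 comb11 sel) sel ↔
        i ∈ sel ∨ ∃ c ∈ cs, fsFirst L 0 c = some i := by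
  induction cs with
  | nil => intro sel i; simp
  | cons c cs ih =>
    intro sel i
    rw [List.foldl_cons, ih, mem_fsBFind]
    constructor
    · rintro (⟨h | h⟩ | ⟨x, hx, hf⟩)
      · exact Or.inl h
      · exact Or.inr ⟨c, List.mem_cons_self, h⟩
      · exact Or.inr ⟨x, List.mem_cons_of_mem _ hx, hf⟩
    · rintro (h | ⟨x, hx, hf⟩)
      · exact Or.inl (Or.inl h)
      · rcases List.mem_cons.mp hx with rfl | hx
        · exact Or.inl (Or.inr hf)
        · exact Or.inr ⟨x, hx, hf⟩

theorem fsFirst_succ (l : List (List Int)) :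
    ∀ (k : Nat) (c11 : List Int),
      fsFirst l (k + 1) c11 = Option.map (· + 1) (fsFirst l k c11) := by
  induction l with
  | nil => intro k c11; rfl
  | cons c rest ih =>
    intro k c11
    rw [fsFirst, fsFirst]
    rcases h : fsCov c c11 with _ | _
    · simp only [Bool.false_eq_true, if_false]
      exact ih (k + 1) c11
    · simp

theorem fsBOut_eq_fsOutP (l : List (List Int)) :
    ∀ (k : Nat) (sel : PySem.Set Nat),
      fsBOut l k sel = fsOutP l k (fun i => PySem.Set.contains sel i) := by
  induction l with
  | nil => intro k sel; rfl
  | cons c rest ih => intro k sel; rw [fsBOut, fsOutP, ih]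

theorem fsOutP_congr (l : List (List Int)) :
    ∀ (k : Nat) (P Q : Nat → Bool), (∀ i, P i = Q i) → fsOutP l k P = fsOutP l k Q := by
  induction l with
  | nil => intro k P Q _; rfl
  | cons c rest ih => intro k P Q h; rw [fsOutP, fsOutP, h k, ih _ _ _ h]

theorem fsOutP_shift (l : List (List Int)) :
    ∀ (k : Nat) (P : Nat → Bool), fsOutP l (k + 1) P = fsOutP l k (fun i => P (i + 1)) := by
  induction l with
  | nil => intro k P; rfl
  | cons c rest ih => intro k P; rw [fsOutP, fsOutP, ih (k + 1) P]

theorem fsOutP_first_eq_fsG (L : List (List Int)) :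
    ∀ cs : List (List Int),
      fsOutP L 0 (fun i => decide (∃ c ∈ cs, fsFirst L 0 c = some i)) = fsG L cs := by
  induction L with
  | nil => intro cs; rfl
  | cons c rest ih =>
    intro cs
    rw [fsOutP, fsG, fsOutP_shift]
    have h0 : (decide (∃ c11 ∈ cs, fsFirst (c :: rest) 0 c11 = some 0)) = cs.any (fsCov c) := by
      apply Bool.eq_iff_iff.mpr
      rw [List.any_eq_true]
      constructor
      · rintro h
        rcases decide_eq_true_iff.mp h with ⟨x, hx, hf⟩
        refine ⟨x, hx, ?_⟩
        rw [fsFirst] at hf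
        rcases hc : fsCov c x with _ | _
        · rw [if_neg (by simp [hc]), fsFirst_succ] at hf
          rcases ho : fsFirst rest 0 x with _ | j <;> rw [ho] at hf <;> simp at hf
        · rfl
      · rintro ⟨x, hx, hc⟩
        exact decide_eq_true_iff.mpr ⟨x, hx, by rw [fsFirst, if_pos hc]⟩
    have hshift : ∀ i : Nat,
        (decide (∃ c11 ∈ cs, fsFirst (c :: rest) 0 c11 = some (i + 1))) =
        (decide (∃ c11 ∈ cs.filter (fun s => !fsCov c s), fsFirst rest 0 c11 = some i)) := by
      intro i
      apply Bool.eq_iff_iff.mpr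
      rw [decide_eq_true_iff, decide_eq_true_iff]
      constructor
      · rintro ⟨x, hx, hf⟩
        rw [fsFirst] at hf
        rcases hc : fsCov c x with _ | _
        · rw [if_neg (by simp [hc]), fsFirst_succ] at hf
          rcases ho : fsFirst rest 0 x with _ | j <;> rw [ho] at hf <;> simp at hf
          refine ⟨x, List.mem_filter.mpr ⟨hx, by simp [hc]⟩, ?_⟩
          rw [ho, hf]
        · rw [if_pos hc] at hf; simp at hf
      · rintro ⟨x, hx, hf⟩
        rcases List.mem_filter.mp hx with ⟨hxcs, hxc⟩
        refine ⟨x, hxcs, ?_⟩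
        have hc : fsCov c x = false := by
          rcases h : fsCov c x with _ | _
          · rfl
          · rw [h] at hxc; simp at hxc
        rw [fsFirst, if_neg (by simp [hc]), fsFirst_succ, hf]
        rfl
    rw [h0, fsOutP_congr rest 0 _ _ hshift, ih]
    by_cases h : cs.any (fsCov c) = true <;> simp [h]

-- ===== VERDICT (by name: the statement is the Claim_ definition above) =====
theorem find_subsets_of_15_that_contain_11_spec : Claim_equal_find_subsets_of_15_that_contain_11 := by
  intro L cs _
  show fsALoop L (PySem.Set.ofList cs) [] = _
  rw [fsALoop_eq_fsG L _ [] (PySem.Set.nodup_ofList cs), List.nil_append]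
  unfold find_subsets_of_15_that_contain_11_alt
  rw [fsBOut_eq_fsOutP]
  have hsel : ∀ i : Nat,
      (PySem.Set.contains ((PySem.Set.ofList cs).foldl
        (fun sel comb11 => fsBFind L 0 comb11 sel) PySem.Set.empty) i) =
      (decide (∃ c ∈ (PySem.Set.ofList cs : List (List Int)), fsFirst L 0 c = some i)) := by
    intro i
    apply Bool.eq_iff_iff.mpr
    rw [PySem.Set.contains_iff, decide_eq_true_iff, mem_selected]
    simp [PySem.Set.empty]
  rw [fsOutP_congr L 0 _ _ hsel, fsOutP_first_eq_fsG]
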